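-- pv_equiv track=rewrite | github.com/YoujunZhao/AutoRebuttal | skills/auto-rebuttal/scripts/extract_pdf_text.py | _decode_pdf_literal
-- ===== SOURCE A (Python) =====
-- def _decode_pdf_literal(stream_text: str, start_index: int) -> tuple[str, int]:
--     result: list[str] = []
--     nesting = 1
--     index = start_index + 1
--
--     while index < len(stream_text):
--         char = stream_text[index]
--         if char == "\\":
--             index += 1
--             if index >= len(stream_text):
--                 break
--             escape = stream_text[index]
--             escape_map = {
--                 "n": "\n",
--                 "r": "\r",
--                 "t": "\t",
--                 "b": "\b",
--                 "f": "\f",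
--                 "(": "(",
--                 ")": ")",
--                 "\\": "\\",
--             }
--             if escape in escape_map:
--                 result.append(escape_map[escape])
--             elif escape in "01234567":
--                 octal_digits = [escape]
--                 for _ in range(2):
--                     next_index = index + 1
--                     if next_index >= len(stream_text) or stream_text[next_index] not in "01234567":
--                         break
--                     index = next_index
--                     octal_digits.append(stream_text[index])
--                 result.append(chr(int("".join(octal_digits), 8)))
--             else:
--                 result.append(escape)
--         elif char == "(":
--             nesting += 1
--             result.append(char)
--         elif char == ")":
--             nesting -= 1
--             if nesting == 0:
--                 return "".join(result), index + 1
--             result.append(char)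
--         else:
--             result.append(char)
--         index += 1
--
--     return "".join(result), index
-- ===== SOURCE B (Python) =====
-- def _read_escape(s, index):
--     # index points at the backslash; returns (decoded_piece, next_scan_index),
--     # or None when the backslash is the last character.
--     j = index + 1
--     if j >= len(s):
--         return None
--     esc = s[j]
--     escape_map = {"n": "\n", "r": "\r", "t": "\t", "b": "\b", "f": "\f",
--                   "(": "(", ")": ")", "\\": "\\"}
--     if esc in escape_map:
--         return escape_map[esc], j + 1
--     if esc in "01234567":
--         digits = esc
--         pos = j
--         for _ in range(2):
--             nxt = pos + 1
--             if nxt >= len(s) or s[nxt] not in "01234567":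
--                 break
--             pos = nxt
--             digits += s[pos]
--         return chr(int(digits, 8)), pos + 1
--     return esc, j + 1
--
--
-- def _decode_inner(s, index):
--     # decodes from `index` up to the unmatched ')' (closed=True, index just
--     # past it), or to end of input (closed=False).
--     parts = []
--     while index < len(s):
--         ch = s[index]
--         if ch == "\\":
--             r = _read_escape(s, index)
--             if r is None:
--                 return "".join(parts), index + 1, False
--             piece, index = r
--             parts.append(piece)
--         elif ch == "(":
--             inner, index, closed = _decode_inner(s, index + 1)
--             if closed:
--                 parts.append("(" + inner + ")")
--             else:
--                 parts.append("(" + inner)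
--                 return "".join(parts), index, False
--         elif ch == ")":
--             return "".join(parts), index + 1, True
--         else:
--             parts.append(ch)
--             index += 1
--     return "".join(parts), index, False
--
--
-- def _decode_pdf_literal(stream_text: str, start_index: int) -> tuple[str, int]:
--     text, index, _closed = _decode_inner(stream_text, start_index + 1)
--     return text, index
-- ===== Notes on version B (the rewrite author's own statement) =====
-- stated objective: alternative
-- what changed: Replaces the single flat loop with a shared nesting counter by recursive descent: a helper decodes one parenthesis level, threads the resume index and a closed/EOF flag through return values, and wraps inner levels in '('+inner+')'.
import Mathlib
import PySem

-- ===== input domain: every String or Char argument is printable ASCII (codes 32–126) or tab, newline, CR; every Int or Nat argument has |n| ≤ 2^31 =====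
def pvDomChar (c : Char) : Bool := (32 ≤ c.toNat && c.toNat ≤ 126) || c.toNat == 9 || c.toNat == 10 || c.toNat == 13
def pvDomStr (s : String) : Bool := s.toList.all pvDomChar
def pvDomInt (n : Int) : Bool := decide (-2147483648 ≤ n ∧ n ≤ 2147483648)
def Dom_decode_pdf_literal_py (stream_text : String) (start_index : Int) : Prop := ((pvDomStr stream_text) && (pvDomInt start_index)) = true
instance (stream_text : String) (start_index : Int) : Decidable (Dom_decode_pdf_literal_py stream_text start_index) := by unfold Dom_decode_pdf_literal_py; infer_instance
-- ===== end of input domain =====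

-- B is an "alternative": recursive descent over the nested parentheses instead of A's
-- flat loop with a nesting counter. Same cost, same return value everywhere A returns.

-- ===== PORT A =====
-- the escape_map dict literal of A (and of B, which reuses the same escape logic)
def pvEscMap (e : Char) : Option Char :=
  if e = 'n' then some '\n'
  else if e = 'r' then some '\r'
  else if e = 't' then some '\t'
  else if e = 'b' then some (Char.ofNat 8)
  else if e = 'f' then some (Char.ofNat 12)
  else if e = '(' then some '('
  else if e = ')' then some ')'
  else if e = '\\' then some '\\'
  else none

def pvIsOct (d : Char) : Bool := ("01234567".toList).contains d

-- one step of A's `for _ in range(2)` octal loop (the failed check is absorbing,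
-- so applying it twice is exact for the loop-with-break)
def pvOctStep (l : List Char) (st : List Char × Int) : List Char × Int :=
  let nxt := st.2 + 1
  if nxt ≥ (l.length : Int) then st
  else
    match PySem.List.pyGet? l nxt with
    | none => st
    | some d => if pvIsOct d then (st.1 ++ [d], nxt) else st

-- A's escape handling, starting at the backslash position j (B's Python reuses these
-- exact lines as its helper _read_escape): none = the `index >= len` break at EOF;
-- some (piece, idx') = decoded piece and the index at which scanning resumes.
def pvReadEscape (l : List Char) (j : Int) : Option (List Char × Int) :=
  let j1 := j + 1
  if j1 ≥ (l.length : Int) then none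
  else
    match PySem.List.pyGet? l j1 with
    | none => none   -- IndexError in Python; excluded by Pre_
    | some e =>
      match pvEscMap e with
      | some v => some ([v], j1 + 1)
      | none =>
        if pvIsOct e then
          let (digits, pos) := pvOctStep l (pvOctStep l ([e], j1))
          some ([Char.ofNat (digits.foldl (fun a d => a * 8 + (d.toNat - 48)) 0)], pos + 1)
        else some ([e], j1 + 1)

theorem pvReadEscape_gt {l : List Char} {j : Int} {p : List Char} {i : Int}
    (h : pvReadEscape l j = some (p, i)) : j < i := by
  unfold pvReadEscape at h
  by_cases hlen : j + 1 ≥ (l.length : Int)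
  · simp [hlen] at h
  · simp only [hlen, if_false] at h
    cases hg : PySem.List.pyGet? l (j + 1) with
    | none => rw [hg] at h; simp at h
    | some e =>
      rw [hg] at h
      dsimp only at h
      cases hm : pvEscMap e with
      | some v => rw [hm] at h; simp at h; omega
      | none =>
        rw [hm] at h
        by_cases ho : pvIsOct e
        · simp only [ho, if_true] at h
          have hstep : ∀ st : List Char × Int, st.2 ≤ (pvOctStep l st).2 := by
            intro st
            unfold pvOctStep
            dsimp only
            split
            · exact le_refl _
            · cases PySem.List.pyGet? l (st.2 + 1) with
              | none => exact le_refl _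
              | some d => dsimp only; split <;> simp
          have h1 := hstep ([e], j + 1)
          have h2 := hstep (pvOctStep l ([e], j + 1))
          rcases hd : pvOctStep l (pvOctStep l ([e], j + 1)) with ⟨digits, pos⟩
          rw [hd] at h h2
          simp at h
          omega
        · simp only [ho] at h; simp at h; omega

-- A's while loop: state (index, nesting, result); WF recursion on the distance to the end
def pvLoopA (l : List Char) (index : Int) (nesting : Int) (acc : List Char) :
    List Char × Int :=
  if _h : index < (l.length : Int) then
    match PySem.List.pyGet? l index with
    | none => ([], 0)   -- IndexError in Python; excluded by Pre_
    | some c =>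
      if c = '\\' then
        match he : pvReadEscape l index with
        | none => (acc, index + 1)                       -- the break: index was incremented, then EOF
        | some (piece, idx') => pvLoopA l idx' nesting (acc ++ piece)
      else if c = '(' then
        pvLoopA l (index + 1) (nesting + 1) (acc ++ [c])
      else if c = ')' then
        if nesting - 1 = 0 then (acc, index + 1)
        else pvLoopA l (index + 1) (nesting - 1) (acc ++ [c])
      else pvLoopA l (index + 1) nesting (acc ++ [c])
  else (acc, index)
termination_by ((l.length : Int) - index).toNat
decreasing_by
  · have := pvReadEscape_gt he; omega
  · omega
  · omega
  · omega

def decode_pdf_literal_py (stream_text : String) (start_index : Int) : String × Int :=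
  let l := stream_text.toList
  let (res, i) := pvLoopA l (start_index + 1) 1 []
  (String.ofList res, i)

-- ===== PORT B =====
-- B's _decode_inner: decodes one parenthesis level from `index`; returns
-- (decoded chars, resume index, closed?).  Fuel only makes the nested recursion
-- structurally total; the wrapper passes enough for every input.
def pvDecB (l : List Char) : Nat → Int → List Char × Int × Bool
  | 0, _ => ([], 0, false)   -- fuel exhausted: unreachable with the wrapper's fuel
  | f + 1, index =>
    if index < (l.length : Int) then
      match PySem.List.pyGet? l index with
      | none => ([], 0, false)   -- IndexError in Python; excluded by Pre_
      | some c =>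
        if c = '\\' then
          match pvReadEscape l index with
          | none => ([], index + 1, false)
          | some (piece, idx') =>
            let (rest, i, cl) := pvDecB l f idx'
            (piece ++ rest, i, cl)
        else if c = '(' then
          let (inner, i1, cl1) := pvDecB l f (index + 1)
          if cl1 then
            let (rest, i2, cl2) := pvDecB l f i1
            ('(' :: inner ++ ')' :: rest, i2, cl2)
          else ('(' :: inner, i1, false)
        else if c = ')' then ([], index + 1, true)
        else
          let (rest, i, cl) := pvDecB l f (index + 1)
          (c :: rest, i, cl)
    else ([], index, false)

def decode_pdf_literal_py_alt (stream_text : String) (start_index : Int) : String × Int :=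
  let l := stream_text.toList
  let fuel := ((l.length : Int) - (start_index + 1)).toNat + 1
  let (t, i, _) := pvDecB l fuel (start_index + 1)
  (String.ofList t, i)

-- ===== PRECONDITION & SPEC =====
-- Pre_ excludes exactly the inputs on which Python A raises IndexError: the very first
-- access s[start_index+1] is attempted (start_index+1 < len) but below -len.
def Pre_decode_pdf_literal_py (stream_text : String) (start_index : Int) : Prop :=
  ¬ (start_index + 1 < (stream_text.toList.length : Int) ∧
     start_index + 1 < -(stream_text.toList.length : Int))
instance (stream_text : String) (start_index : Int) : Decidable (Pre_decode_pdf_literal_py stream_text start_index) := by unfold Pre_decode_pdf_literal_py; infer_instance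

def pvWitness_decode_pdf_literal_py : String × Int := ("(a\\n(b)c)", 0)

def Spec_decode_pdf_literal_py (stream_text : String) (start_index : Int) (out : String × Int) : Prop := out = decode_pdf_literal_py_alt stream_text start_index
instance (stream_text : String) (start_index : Int) (out : String × Int) : Decidable (Spec_decode_pdf_literal_py stream_text start_index out) := by unfold Spec_decode_pdf_literal_py; infer_instance

-- ===== CLAIM (what is proved, stated in full; the proofs are below) =====
def Claim_equal_decode_pdf_literal_py : Prop := ∀ (stream_text : String) (start_index : Int), Dom_decode_pdf_literal_py stream_text start_index → Pre_decode_pdf_literal_py stream_text start_index → Spec_decode_pdf_literal_py stream_text start_index (decode_pdf_literal_py stream_text start_index)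

-- ===== LEMMAS AND PROOFS =====

-- a closed level of B ends strictly to the right of where it started
theorem pvDecB_closed_gt (l : List Char) :
    ∀ (f : Nat) (j : Int) (t : List Char) (i : Int),
      pvDecB l f j = (t, i, true) → j < i := by
  intro f
  induction f with
  | zero => intro j t i h; simp [pvDecB] at h
  | succ f ih =>
    intro j t i h
    rw [pvDecB] at h
    by_cases hlt : j < (l.length : Int)
    · simp only [hlt, if_true] at h
      cases hg : PySem.List.pyGet? l j with
      | none => rw [hg] at h; simp at h
      | some c =>
        rw [hg] at h
        by_cases hbs : c = '\\'
        · simp only [hbs, if_true] at h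
          cases he : pvReadEscape l j with
          | none => rw [he] at h; simp at h
          | some pr =>
            rw [he] at h
            rcases pr with ⟨piece, idx'⟩
            rcases hB : pvDecB l f idx' with ⟨rest, i', cl⟩
            simp only [hB, Prod.mk.injEq] at h
            obtain ⟨-, h2, h3⟩ := h
            have := pvReadEscape_gt he
            have := ih idx' rest i (by rw [hB, h2, h3])
            omega
        · simp only [hbs, if_false] at h
          by_cases hop : c = '('
          · simp only [hop, if_true] at h
            rcases h1 : pvDecB l f (j + 1) with ⟨inner, i1, cl1⟩
            simp only [h1] at h
            cases cl1 with
            | false => simp at h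
            | true =>
              simp only [if_true] at h
              rcases h2 : pvDecB l f i1 with ⟨rest, i2, cl2⟩
              simp only [h2, Prod.mk.injEq] at h
              obtain ⟨-, hh2, hh3⟩ := h
              have g1 := ih (j + 1) inner i1 h1
              have g2 := ih i1 rest i (by rw [h2, hh2, hh3])
              omega
          · simp only [hop, if_false] at h
            by_cases hcp : c = ')'
            · simp only [hcp, if_true, Prod.mk.injEq] at h
              omega
            · simp only [hcp, if_false] at h
              rcases h1 : pvDecB l f (j + 1) with ⟨rest, i', cl⟩
              simp only [h1, Prod.mk.injEq] at h
              obtain ⟨-, h2, h3⟩ := h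
              have := ih (j + 1) rest i (by rw [h1, h2, h3])
              omega
    · simp only [hlt, if_false] at h
      simp at h

-- in-range index yields a character
theorem pvGet_some (l : List Char) (i : Int) (h1 : -(l.length : Int) ≤ i)
    (h2 : i < (l.length : Int)) : ∃ c, PySem.List.pyGet? l i = some c := by
  cases hg : PySem.List.pyGet? l i with
  | some c => exact ⟨c, rfl⟩
  | none =>
    rw [PySem.List.pyGet?_eq_none_iff] at hg
    exact absurd (by unfold PySem.Raise.InRange; omega) hg

-- the main simulation: A's loop at nesting n equals B's level decoder followed by
-- A's loop at nesting n-1 when the level closes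
theorem pvMain (l : List Char) :
    ∀ (f : Nat) (index n : Int) (acc : List Char), 1 ≤ n →
      -(l.length : Int) ≤ index → ((l.length : Int) - index).toNat < f →
      pvLoopA l index n acc =
        (match pvDecB l f index with
         | (t, i, cl) =>
           if cl then
             if n = 1 then (acc ++ t, i)
             else pvLoopA l i (n - 1) (acc ++ t ++ [')'])
           else (acc ++ t, i)) := by
  intro f
  induction f with
  | zero => intro index n acc _ _ hf; omega
  | succ f ih =>
    intro index n acc hn hlo hf
    rw [pvLoopA, pvDecB]
    by_cases hlt : index < (l.length : Int)
    · simp only [hlt, if_true, dif_pos]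
      obtain ⟨c, hg⟩ := pvGet_some l index hlo hlt
      rw [hg]
      by_cases hbs : c = '\\'
      · simp only [hbs, if_true]
        cases he : pvReadEscape l index with
        | none => simp
        | some pr =>
          rcases pr with ⟨piece, idx'⟩
          have hgt := pvReadEscape_gt he
          rcases hB : pvDecB l f idx' with ⟨rest, i, cl⟩
          have hrec := ih idx' n (acc ++ piece) hn (by omega) (by omega)
          rw [hB] at hrec
          simp only [hB]
          rw [hrec]
          cases cl <;> simp [List.append_assoc]
      · simp only [hbs, if_false]
        by_cases hop : c = '('
        · subst hop
          simp only [if_true]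
          rcases h1 : pvDecB l f (index + 1) with ⟨inner, i1, cl1⟩
          have hrec1 := ih (index + 1) (n + 1) (acc ++ ['(']) (by omega) (by omega) (by omega)
          rw [h1] at hrec1
          cases cl1 with
          | false =>
            simp only at hrec1 ⊢
            rw [hrec1]
            simp [List.append_assoc]
          | true =>
            have hi1 := pvDecB_closed_gt l f (index + 1) inner i1 h1
            simp only [if_true] at hrec1
            have hn1 : ¬ (n + 1 = 1) := by omega
            rw [if_neg hn1] at hrec1
            have hsimp : n + 1 - 1 = n := by ring
            rw [hsimp] at hrec1
            rcases h2 : pvDecB l f i1 with ⟨rest, i2, cl2⟩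
            have hrec2 := ih i1 n (acc ++ ['('] ++ inner ++ [')']) hn (by omega) (by omega)
            rw [h2] at hrec2
            rw [hrec1, hrec2]
            cases cl2 <;> simp [List.append_assoc]
        · simp only [hop, if_false]
          by_cases hcp : c = ')'
          · subst hcp
            simp only [if_true]
            by_cases hn1 : n - 1 = 0
            · have : n = 1 := by omega
              simp [this]
            · have : ¬ (n = 1) := by omega
              simp [hn1, this]
          · simp only [hcp, if_false]
            rcases h1 : pvDecB l f (index + 1) with ⟨rest, i, cl⟩
            have hrec := ih (index + 1) n (acc ++ [c]) hn (by omega) (by omega)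
            rw [h1] at hrec
            rw [hrec]
            cases cl <;> simp [List.append_assoc]
    · simp only [dif_neg hlt]
      simp [hlt]

-- ===== VERDICT (by name: the statement is the Claim_ definition above) =====
theorem decode_pdf_literal_py_spec : Claim_equal_decode_pdf_literal_py := by
  intro s st _hdom hpre
  unfold Spec_decode_pdf_literal_py decode_pdf_literal_py decode_pdf_literal_py_alt
  unfold Pre_decode_pdf_literal_py at hpre
  set l := s.toList with hl
  have hlo : -(l.length : Int) ≤ st + 1 := by
    by_cases h : st + 1 < (l.length : Int)
    · omega
    · have : (0:Int) ≤ (l.length : Int) := by positivity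
      omega
  have hmain := pvMain l (((l.length : Int) - (st + 1)).toNat + 1) (st + 1) 1 []
    (by omega) hlo (by omega)
  rcases hB : pvDecB l (((l.length : Int) - (st + 1)).toNat + 1) (st + 1) with ⟨t, i, cl⟩
  rw [hB] at hmain
  simp only [hB]
  rw [hmain]
  cases cl <;> simp
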